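-- pv_equiv track=rewrite | github.com/Clean-Code0244/PythonCodeStepByStepSolutions | PythonCodeStepByStep/strings/convert_to_alt_caps.py | convert_to_alt_caps
-- ===== SOURCE A (Python) =====
-- def convert_to_alt_caps(string):
--     string_array = []
--     for i in range(len(string)):
--         string_array.append(string[i])
--     a = 0
--     for i in range(len(string_array)):
--         if string_array[i] == " ":
--             a -= 1
--         if a % 2 == 0:
--             string_array[i] = string_array[i].lower()
--
--         else:
--             string_array[i] = string_array[i].upper()
--         a += 1
--     newstr = ""
--     for i in string_array:
--         newstr += i
--     return newstr
-- ===== SOURCE B (Python) =====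
-- def convert_to_alt_caps(string):
--     chars = list(string)
--     idxs = [i for i, c in enumerate(chars) if c != " "]
--     for k, i in enumerate(idxs):
--         chars[i] = chars[i].lower() if k % 2 == 0 else chars[i].upper()
--     return "".join(chars)
-- ===== Notes on version B (the rewrite author's own statement) =====
-- stated objective: alternative
-- what changed: Replaces A's single counter-carrying loop (decrement-on-space parity counter mutating each cell in order) by two passes: collect the indices of non-space characters, then set only those positions by the parity of their rank, leaving spaces untouched.
import Mathlib
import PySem

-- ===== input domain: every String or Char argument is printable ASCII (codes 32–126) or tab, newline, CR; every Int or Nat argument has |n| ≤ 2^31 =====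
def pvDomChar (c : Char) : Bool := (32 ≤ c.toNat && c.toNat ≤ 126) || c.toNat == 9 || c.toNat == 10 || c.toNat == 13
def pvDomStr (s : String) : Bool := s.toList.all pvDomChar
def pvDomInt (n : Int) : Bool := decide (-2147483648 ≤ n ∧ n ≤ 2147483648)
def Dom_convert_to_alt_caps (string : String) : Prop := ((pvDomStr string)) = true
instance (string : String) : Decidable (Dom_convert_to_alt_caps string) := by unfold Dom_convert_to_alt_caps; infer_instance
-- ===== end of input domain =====

-- B rewrites A's single counter-carrying mutation loop as two passes — collect the indices of
-- the non-space characters, then case each by the parity of its rank — same return value (alternative decomposition).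

-- ===== PORT A =====
-- second loop of A: walks string_array keeping the counter a; the indexed in-place
-- update string_array[i] = … becomes the head of the structural recursion
def pvALoop : List Char → Int → List Char
  | [], _ => []
  | c :: rest, a =>
    let a1 := if c = ' ' then a - 1 else a
    let c' := if PySem.Int.mod a1 2 = 0 then PySem.Chars.lowerChar c else PySem.Chars.upperChar c
    c' :: pvALoop rest (a1 + 1)

def convert_to_alt_caps (string : String) : String :=
  let cs := string.toList
  -- for i in range(len(string)): string_array.append(string[i])
  let string_array : List Char :=
    (PySem.List.pyRange 0 (PySem.List.len cs) 1).foldl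
      (fun acc i => acc ++ [PySem.List.pyGetD cs i ' ']) []
  let arr2 := pvALoop string_array 0
  -- newstr = ""; for i in string_array: newstr += i
  String.mk (arr2.foldl (fun acc c => acc ++ [c]) [])

-- ===== PORT B =====
def convert_to_alt_caps_alt (string : String) : String :=
  let chars := string.toList
  -- idxs = [i for i, c in enumerate(chars) if c != " "]
  let idxs : List Int :=
    (PySem.List.enumerate chars 0).filterMap (fun p => if p.2 ≠ ' ' then some p.1 else none)
  -- for k, i in enumerate(idxs): chars[i] = chars[i].lower() if k % 2 == 0 else chars[i].upper()
  let out :=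
    (PySem.List.enumerate idxs 0).foldl
      (fun acc p =>
        PySem.List.pySetD acc p.2
          (if PySem.Int.mod p.1 2 = 0 then PySem.Chars.lowerChar (PySem.List.pyGetD acc p.2 ' ')
           else PySem.Chars.upperChar (PySem.List.pyGetD acc p.2 ' '))) chars
  String.mk out

-- ===== PRECONDITION & SPEC =====
def Spec_convert_to_alt_caps (string : String) (out : String) : Prop := out = convert_to_alt_caps_alt string
instance (string : String) (out : String) : Decidable (Spec_convert_to_alt_caps string out) := by unfold Spec_convert_to_alt_caps; infer_instance

-- ===== CLAIM (what is proved, stated in full; the proofs are below) =====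
def Claim_equal_convert_to_alt_caps : Prop := ∀ (string : String), Dom_convert_to_alt_caps string → Spec_convert_to_alt_caps string (convert_to_alt_caps string)

-- ===== LEMMAS AND PROOFS =====

-- reference: alternate case over non-space chars, k = rank of the next non-space char
def pvG : List Char → Nat → List Char
  | [], _ => []
  | c :: rest, k =>
    if c = ' ' then ' ' :: pvG rest k
    else (if k % 2 = 0 then PySem.Chars.lowerChar c else PySem.Chars.upperChar c) :: pvG rest (k + 1)

-- Nat-side index list of non-space positions, offset s
def pvIdx : List Char → Nat → List Nat
  | [], _ => []
  | c :: rest, s => if c = ' ' then pvIdx rest (s + 1) else s :: pvIdx rest (s + 1)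

lemma pvMod2 (n : Nat) : PySem.Int.mod (n : Int) 2 = ((n % 2 : Nat) : Int) := by
  exact_mod_cast PySem.Int.mod_natCast n 2

lemma pvALoop_eq_pvG : ∀ (l : List Char) (n : Nat), pvALoop l (n : Int) = pvG l n := by
  intro l
  induction l with
  | nil => intro n; rfl
  | cons c rest ih =>
    intro n
    by_cases hc : c = ' '
    · subst hc
      have h1 : (if PySem.Int.mod ((n : Int) - 1) 2 = 0 then PySem.Chars.lowerChar ' '
          else PySem.Chars.upperChar ' ') = ' ' := by split <;> decide
      have h2 : (n : Int) - 1 + 1 = (n : Int) := by ring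
      simp only [pvALoop, pvG, reduceIte]
      rw [h1, h2, ih n]
    · have h3 : (n : Int) + 1 = ((n + 1 : Nat) : Int) := by push_cast; ring
      simp only [pvALoop, pvG, if_neg hc, pvMod2, Nat.cast_eq_zero]
      rw [h3, ih (n + 1)]

lemma pvIdx_shift : ∀ (l : List Char) (s : Nat), pvIdx l (s + 1) = (pvIdx l s).map (· + 1) := by
  intro l
  induction l with
  | nil => intro s; rfl
  | cons c rest ih =>
    intro s
    by_cases hc : c = ' ' <;> simp [pvIdx, hc, ih (s + 1), ih s]

-- B's comprehension produces exactly the Int casts of pvIdx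
lemma pvIdxs_eq : ∀ (l : List Char) (s : Nat),
    (PySem.List.enumerate l (s : Int)).filterMap (fun p => if p.2 ≠ ' ' then some p.1 else none)
      = (pvIdx l s).map (fun n : Nat => (n : Int)) := by
  intro l
  induction l with
  | nil => intro s; rfl
  | cons c rest ih =>
    intro s
    rw [PySem.List.enumerate_cons]
    have hs : (s : Int) + 1 = ((s + 1 : Nat) : Int) := by push_cast; ring
    rw [hs]
    by_cases hc : c = ' '
    · subst hc
      rw [List.filterMap_cons]
      have hnone : (if (' ' : Char) ≠ ' ' then some ((s : Int)) else none) = (none : Option Int) := by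
        simp
      simp only [hnone, pvIdx, reduceIte]
      exact ih (s + 1)
    · simp only [List.filterMap_cons, if_pos hc, pvIdx, if_neg hc, ih (s + 1), List.map_cons]

-- abbreviation for B's fold step
def pvBStep (acc : List Char) (p : Int × Int) : List Char :=
  PySem.List.pySetD acc p.2
    (if PySem.Int.mod p.1 2 = 0 then PySem.Chars.lowerChar (PySem.List.pyGetD acc p.2 ' ')
     else PySem.Chars.upperChar (PySem.List.pyGetD acc p.2 ' '))

lemma pvEnum_map_cast : ∀ (ns : List Nat) (f : Nat → Nat) (k : Int),
    PySem.List.enumerate ((ns.map f).map (fun n : Nat => (n : Int))) k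
      = (PySem.List.enumerate (ns.map (fun n : Nat => (n : Int))) k).map
          (fun p => (p.1, ((f p.2.toNat : Nat) : Int))) := by
  intro ns f
  induction ns with
  | nil => intro k; rfl
  | cons n rest ih =>
    intro k
    simp only [List.map_cons, PySem.List.enumerate_cons, ih (k + 1), List.map_cons,
      Int.toNat_natCast]

-- shifting all indices by one skips the head of the accumulator
lemma pvFold_shift : ∀ (ns : List Nat) (k : Int) (c : Char) (rest : List Char),
    ((PySem.List.enumerate (ns.map (fun n : Nat => (n : Int))) k).map
        (fun p => (p.1, ((p.2.toNat + 1 : Nat) : Int)))).foldl pvBStep (c :: rest)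
      = c :: (PySem.List.enumerate (ns.map (fun n : Nat => (n : Int))) k).foldl pvBStep rest := by
  intro ns
  induction ns with
  | nil => intro k c rest; rfl
  | cons n restN ih =>
    intro k c rest
    simp only [List.map_cons, PySem.List.enumerate_cons, List.foldl_cons, Int.toNat_natCast]
    have h2 : pvBStep (c :: rest) (k, ((n + 1 : Nat) : Int)) = c :: pvBStep rest (k, (n : Int)) := by
      simp only [pvBStep, PySem.List.pySetD_natCast, PySem.List.pyGetD_natCast,
        List.set_cons_succ, List.getD_cons_succ]
    rw [h2, ih (k + 1)]

lemma pvB_main : ∀ (chars : List Char) (k : Nat),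
    (PySem.List.enumerate ((pvIdx chars 0).map (fun n : Nat => (n : Int))) (k : Int)).foldl
        pvBStep chars
      = pvG chars k := by
  intro chars
  induction chars with
  | nil => intro k; rfl
  | cons c rest ih =>
    intro k
    by_cases hc : c = ' '
    · subst hc
      simp only [pvIdx, pvG, reduceIte]
      rw [show pvIdx rest 1 = pvIdx rest (0 + 1) from rfl, pvIdx_shift]
      rw [show ((pvIdx rest 0).map (· + 1)) = (pvIdx rest 0).map (fun n => n + 1) from rfl]
      rw [pvEnum_map_cast (pvIdx rest 0) (fun n => n + 1) (k : Int)]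
      rw [pvFold_shift, ih k]
    · simp only [pvIdx, pvG, if_neg hc]
      rw [show pvIdx rest 1 = pvIdx rest (0 + 1) from rfl, pvIdx_shift]
      simp only [List.map_cons, PySem.List.enumerate_cons, List.foldl_cons]
      have h0 : pvBStep (c :: rest) ((k : Int), ((0 : Nat) : Int))
          = (if k % 2 = 0 then PySem.Chars.lowerChar c else PySem.Chars.upperChar c) :: rest := by
        simp only [pvBStep, PySem.List.pySetD_natCast, PySem.List.pyGetD_natCast, pvMod2,
          Nat.cast_eq_zero]
        rfl
      rw [h0]
      rw [show ((pvIdx rest 0).map (· + 1)) = (pvIdx rest 0).map (fun n => n + 1) from rfl]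
      rw [pvEnum_map_cast (pvIdx rest 0) (fun n => n + 1) ((k : Int) + 1)]
      rw [pvFold_shift]
      rw [show ((k : Int) + 1) = ((k + 1 : Nat) : Int) by push_cast; ring, ih (k + 1)]

-- ===== VERDICT (by name: the statement is the Claim_ definition above) =====
theorem convert_to_alt_caps_spec : Claim_equal_convert_to_alt_caps := by
  intro string _
  show convert_to_alt_caps string = convert_to_alt_caps_alt string
  simp only [convert_to_alt_caps, convert_to_alt_caps_alt]
  rw [PySem.List.foldl_pyRange_zero_pyGetD string.toList ' ' (fun acc c => acc ++ [c]) []]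
  simp only [PySem.List.foldl_append_singleton, List.nil_append]
  have hA : pvALoop string.toList 0 = pvG string.toList 0 := by
    exact_mod_cast pvALoop_eq_pvG string.toList 0
  have hstep : (fun (acc : List Char) (p : Int × Int) =>
      PySem.List.pySetD acc p.2
        (if PySem.Int.mod p.1 2 = 0 then PySem.Chars.lowerChar (PySem.List.pyGetD acc p.2 ' ')
         else PySem.Chars.upperChar (PySem.List.pyGetD acc p.2 ' '))) = pvBStep := rfl
  have h1 := pvIdxs_eq string.toList 0
  have h2 := pvB_main string.toList 0
  simp only [Nat.cast_zero] at h1 h2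
  rw [hA, hstep, h1, h2]
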